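-- pv_equiv track=rewrite | github.com/cybervaca/sqlmap | tamper/doubleencode.py | tamper_triple_encode
-- ===== SOURCE A (Python) =====
-- def tamper_triple_encode(payload, **kwargs):
--     """
--     Triple URL encodes the payload for backends that decode 3 times
--     %25 -> %2525 (triple encoded %)
--
--     Example: space -> %20 -> %2520 -> %252520
--     """
--
--     if not payload:
--         return payload
--
--     retVal = ""
--
--     for char in payload:
--         if char == ' ':
--             retVal += "%252520"
--         elif char == '\'':
--             retVal += "%252527"
--         elif char == '=':
--             retVal += "%25253D"
--         elif char == '(':
--             retVal += "%252528"
--         elif char == ')':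
--             retVal += "%252529"
--         else:
--             retVal += char
--
--     return retVal
-- ===== SOURCE B (Python) =====
-- def tamper_triple_encode(payload, **kwargs):
--     if not payload:
--         return payload
--     # staged passes: one full replace pass per special character; safe because
--     # no replacement string contains any of the five special characters
--     for ch, enc in ((' ', "%252520"), ("'", "%252527"), ('=', "%25253D"),
--                     ('(', "%252528"), (')', "%252529")):
--         payload = payload.replace(ch, enc)
--     return payload
-- ===== Notes on version B (the rewrite author's own statement) =====
-- stated objective: idiomatic
-- what changed: Replaces the single character-by-character loop with its if/elif chain by five staged str.replace passes, one whole-string substitution pass per special character; equivalent because no replacement string contains any of the five special characters, and faster because the per-character Python-level loop is replaced by C-level replace passes.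
import Mathlib
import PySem

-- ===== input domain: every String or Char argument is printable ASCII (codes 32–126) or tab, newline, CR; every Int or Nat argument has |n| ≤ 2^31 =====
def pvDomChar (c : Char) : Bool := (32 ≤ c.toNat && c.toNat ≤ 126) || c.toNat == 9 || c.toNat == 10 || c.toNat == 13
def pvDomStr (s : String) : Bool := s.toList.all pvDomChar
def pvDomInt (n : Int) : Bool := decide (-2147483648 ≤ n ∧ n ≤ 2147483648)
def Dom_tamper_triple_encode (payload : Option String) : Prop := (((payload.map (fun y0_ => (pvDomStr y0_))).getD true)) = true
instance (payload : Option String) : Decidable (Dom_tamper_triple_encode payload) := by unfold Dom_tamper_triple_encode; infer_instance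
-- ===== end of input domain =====

-- B replaces A's single character loop with its if/elif chain by five staged str.replace
-- passes (one whole-string substitution per special character); same values.

-- ===== PORT A =====
-- A: guard empty/None, then loop over chars appending via an if/elif chain.
def tamper_triple_encode (payload : Option String) : Option String :=
  match payload with
  | none => none
  | some s =>
    if s.toList = [] then some s
    else
      some (String.ofList (s.toList.foldl (fun retVal char =>
        if char = ' ' then retVal ++ "%252520".toList
        else if char = '\'' then retVal ++ "%252527".toList
        else if char = '=' then retVal ++ "%25253D".toList
        else if char = '(' then retVal ++ "%252528".toList
        else if char = ')' then retVal ++ "%252529".toList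
        else retVal ++ [char]) []))

-- ===== PORT B =====
-- the (char, encoding) pairs Source B iterates over
def pvPairs : List (Char × String) :=
  [(' ', "%252520"), ('\'', "%252527"), ('=', "%25253D"), ('(', "%252528"), (')', "%252529")]

-- B: guard empty/None, then one full str.replace pass per special character.
def tamper_triple_encode_alt (payload : Option String) : Option String :=
  match payload with
  | none => none
  | some s =>
    if s.toList = [] then some s
    else
      some (pvPairs.foldl (fun acc p => PySem.Str.replace acc (String.ofList [p.1]) p.2) s)

-- ===== PRECONDITION & SPEC =====
def Spec_tamper_triple_encode (payload : Option String) (out : Option String) : Prop := out = tamper_triple_encode_alt payload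
instance (payload : Option String) (out : Option String) : Decidable (Spec_tamper_triple_encode payload out) := by unfold Spec_tamper_triple_encode; infer_instance

-- ===== CLAIM (what is proved, stated in full; the proofs are below) =====
def Claim_equal_tamper_triple_encode : Prop := ∀ (payload : Option String), Dom_tamper_triple_encode payload → Spec_tamper_triple_encode payload (tamper_triple_encode payload)

-- ===== LEMMAS AND PROOFS =====

-- one replace pass with a single-character pattern, as a flatMap
def pvRep (c : Char) (r : List Char) (l : List Char) : List Char :=
  l.flatMap (fun x => if x = c then r else [x])

theorem pvRep_append (c : Char) (r a b : List Char) :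
    pvRep c r (a ++ b) = pvRep c r a ++ pvRep c r b := by
  simp [pvRep]

-- Chars.replace.go with a single-character pattern computes pvRep
theorem pv_go (c : Char) (r : List Char) (l : List Char) :
    ∀ (fuel : Nat) (acc : List Char), l.length ≤ fuel →
      PySem.Chars.replace.go [c] r fuel l acc = acc.reverse ++ pvRep c r l := by
  induction l with
  | nil =>
    intro fuel acc _
    cases fuel <;> simp [PySem.Chars.replace.go, pvRep]
  | cons x t ih =>
    intro fuel acc h
    cases fuel with
    | zero => simp at h
    | succ f =>
      by_cases hx : x = c
      · have hpre : List.isPrefixOf [c] (x :: t) = true := by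
          simp [List.isPrefixOf, hx]
        rw [PySem.Chars.replace.go, if_pos hpre]
        have := ih f (r.reverse ++ acc) (by simpa using Nat.lt_succ_iff.mp (by simpa using h))
        rw [show List.drop [c].length (x :: t) = t from by simp, this]
        simp [pvRep, hx]
      · have hpre : List.isPrefixOf [c] (x :: t) = false := by
          simp [List.isPrefixOf]; exact fun hc => hx hc.symm
        rw [PySem.Chars.replace.go, if_neg (by simp [hpre])]
        have := ih f (x :: acc) (by simpa using Nat.lt_succ_iff.mp (by simpa using h))
        rw [this]
        simp [pvRep, hx]

theorem pv_replace (c : Char) (r : List Char) (l : List Char) :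
    PySem.Chars.replace l [c] r = pvRep c r l := by
  rw [PySem.Chars.replace]
  simp only [List.isEmpty_cons, if_neg (by decide : (false : Bool) ≠ true)]
  simpa using pv_go c r l l.length [] le_rfl

-- A's per-character branch chain, as a function
def pvF (x : Char) : List Char :=
  if x = ' ' then "%252520".toList
  else if x = '\'' then "%252527".toList
  else if x = '=' then "%25253D".toList
  else if x = '(' then "%252528".toList
  else if x = ')' then "%252529".toList
  else [x]

-- A's loop builds the flatMap of pvF
theorem pv_fold (l acc : List Char) :
    l.foldl (fun retVal char =>
        if char = ' ' then retVal ++ "%252520".toList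
        else if char = '\'' then retVal ++ "%252527".toList
        else if char = '=' then retVal ++ "%25253D".toList
        else if char = '(' then retVal ++ "%252528".toList
        else if char = ')' then retVal ++ "%252529".toList
        else retVal ++ [char]) acc =
    acc ++ l.flatMap pvF := by
  induction l generalizing acc with
  | nil => simp
  | cons x t ih =>
    rw [List.foldl_cons, List.flatMap_cons, ih]
    unfold pvF
    split_ifs <;> simp

-- the composition of B's five passes, on lists of characters
def pvG (l : List Char) : List Char :=
  pvRep ')' "%252529".toList (pvRep '(' "%252528".toList (pvRep '=' "%25253D".toList
    (pvRep '\'' "%252527".toList (pvRep ' ' "%252520".toList l))))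

theorem pvG_append (a b : List Char) : pvG (a ++ b) = pvG a ++ pvG b := by
  simp [pvG, pvRep_append]

-- on a single character, the five staged passes agree with A's branch chain
theorem pvG_single (x : Char) : pvG [x] = pvF x := by
  by_cases h1 : x = ' '
  · subst h1; decide
  by_cases h2 : x = '\''
  · subst h2; decide
  by_cases h3 : x = '='
  · subst h3; decide
  by_cases h4 : x = '('
  · subst h4; decide
  by_cases h5 : x = ')'
  · subst h5; decide
  simp [pvG, pvRep, pvF, h1, h2, h3, h4, h5]

theorem pvG_eq_flatMap (l : List Char) : pvG l = l.flatMap pvF := by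
  induction l with
  | nil => decide
  | cons x t ih =>
    have : (x :: t) = [x] ++ t := rfl
    rw [this, pvG_append, pvG_single, ih]; simp

-- B's foldl over the five pairs computes pvG
theorem pv_alt_fold (s : String) :
    pvPairs.foldl (fun acc p => PySem.Str.replace acc (String.ofList [p.1]) p.2) s =
    String.ofList (pvG s.toList) := by
  simp only [pvPairs, List.foldl_cons, List.foldl_nil, PySem.Str.replace, pvG]
  simp [pv_replace]

-- ===== VERDICT (by name: the statement is the Claim_ definition above) =====
theorem tamper_triple_encode_spec : Claim_equal_tamper_triple_encode := by
  intro payload _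
  unfold Spec_tamper_triple_encode tamper_triple_encode tamper_triple_encode_alt
  cases payload with
  | none => rfl
  | some s =>
    by_cases h : s.toList = []
    · simp [h]
    · simp only [h, if_false]
      rw [pv_fold, pv_alt_fold, pvG_eq_flatMap]
      simp
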